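-- pv_equiv track=rewrite | github.com/rjorton/SeqFeats | seqfeats_host_cpb.py | count_dinucleotides
-- ===== SOURCE A (Python) =====
-- def count_dinucleotides(this_seq, dinuc_dict):
--     for i in range(len(this_seq)-1):
--         this_dinuc = this_seq[i:i+2]
--
--         if this_dinuc in dinuc_dict:
--             dinuc_dict[this_dinuc] += 1
--         else:
--             dinuc_dict["NN"] += 1
--
--     return dinuc_dict
-- ===== SOURCE B (Python) =====
-- def count_dinucleotides(this_seq, dinuc_dict):
--     # List all adjacent dinucleotides once, then update each dict key by a
--     # per-key count: known keys get the count of exact occurrences, and the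
--     # 'NN' key additionally absorbs every dinucleotide that is not a key.
--     dinucs = [this_seq[i:i + 2] for i in range(len(this_seq) - 1)]
--     keys = list(dinuc_dict)
--     for k in keys:
--         if k == "NN":
--             extra = sum(1 for dn in dinucs if dn == "NN" or dn not in keys)
--         else:
--             extra = dinucs.count(k)
--         dinuc_dict[k] += extra
--     return dinuc_dict
-- ===== Notes on version B (the rewrite author's own statement) =====
-- stated objective: alternative
-- what changed: Instead of A's per-position loop that increments dinuc_dict once per sequence position, B lists the adjacent dinucleotides once and then iterates over the dict's keys, adding to each key a single per-key aggregate (its occurrence count, with the 'NN' key also absorbing all non-key dinucleotides).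
import Mathlib
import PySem

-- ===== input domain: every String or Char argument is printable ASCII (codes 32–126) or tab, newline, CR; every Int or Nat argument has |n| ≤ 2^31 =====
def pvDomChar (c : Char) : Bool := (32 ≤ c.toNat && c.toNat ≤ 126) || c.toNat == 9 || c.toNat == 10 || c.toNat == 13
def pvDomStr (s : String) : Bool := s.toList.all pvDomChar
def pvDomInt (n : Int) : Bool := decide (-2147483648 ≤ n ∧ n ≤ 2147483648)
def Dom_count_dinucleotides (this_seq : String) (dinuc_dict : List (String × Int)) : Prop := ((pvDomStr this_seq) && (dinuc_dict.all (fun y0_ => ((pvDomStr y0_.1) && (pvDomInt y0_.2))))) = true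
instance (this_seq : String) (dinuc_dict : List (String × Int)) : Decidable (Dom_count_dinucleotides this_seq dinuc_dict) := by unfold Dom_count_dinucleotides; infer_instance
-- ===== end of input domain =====

-- B: same result via a per-key pass — list the adjacent dinucleotides once, then add to each
-- dict key one aggregate count (the 'NN' key also absorbing non-key dinucleotides) ('alternative';
-- return-value equivalence; both Pythons mutate dinuc_dict identically under Pre_).


-- ===== PORT A =====
def count_dinucleotides (this_seq : String) (dinuc_dict : List (String × Int)) : List (String × Int) :=
  ((PySem.List.pyRange 0 (PySem.Str.len this_seq - 1) 1).foldl
    (fun (acc : PySem.Dict String Int) i =>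
      let this_dinuc := PySem.Str.slice this_seq (some i) (some (i + 2))
      if acc.contains this_dinuc then acc.modify this_dinuc 0 (· + 1)
      else acc.modify "NN" 0 (· + 1))
    (PySem.Dict.mk dinuc_dict)).items

-- ===== PORT B =====
def count_dinucleotides_alt (this_seq : String) (dinuc_dict : List (String × Int)) : List (String × Int) :=
  -- dinucs = [this_seq[i:i+2] for i in range(len(this_seq)-1)]
  let dinucs := (PySem.List.pyRange 0 (PySem.Str.len this_seq - 1) 1).map
    (fun i => PySem.Str.slice this_seq (some i) (some (i + 2)))
  let d0 := PySem.Dict.mk dinuc_dict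
  -- keys = list(dinuc_dict)
  let keys := d0.keys
  -- for k in keys: dinuc_dict[k] += extra(k)
  (keys.foldl
    (fun (acc : PySem.Dict String Int) k =>
      let extra : Int :=
        if k == "NN" then
          ((dinucs.filter (fun dn => dn == "NN" || !(keys.contains dn))).length : Int)
        else (dinucs.count k : Int)
      acc.modify k 0 (· + extra)) d0).items

-- ===== PRECONDITION & SPEC =====
-- Pre_ excludes (a) inputs where some adjacent dinucleotide is missing from dinuc_dict while "NN"
-- is also missing — there Python A raises KeyError — and (b) association lists with
-- duplicate keys, which model no Python dict (A's argument is a dict, so no real input is lost).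
def Pre_count_dinucleotides (this_seq : String) (dinuc_dict : List (String × Int)) : Prop :=
  (dinuc_dict.map Prod.fst).Nodup ∧
  ∀ i < this_seq.toList.length - 1,
    (String.ofList ((this_seq.toList.drop i).take 2) ∈ dinuc_dict.map Prod.fst ∨
      "NN" ∈ dinuc_dict.map Prod.fst)
instance (this_seq : String) (dinuc_dict : List (String × Int)) : Decidable (Pre_count_dinucleotides this_seq dinuc_dict) := by unfold Pre_count_dinucleotides; infer_instance

def pvWitness_count_dinucleotides : String × (List (String × Int)) :=
  ("ACGTX", [("AC", 3), ("CG", 0), ("NN", 1)])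

def Spec_count_dinucleotides (this_seq : String) (dinuc_dict : List (String × Int)) (out : List (String × Int)) : Prop := out = count_dinucleotides_alt this_seq dinuc_dict
instance (this_seq : String) (dinuc_dict : List (String × Int)) (out : List (String × Int)) : Decidable (Spec_count_dinucleotides this_seq dinuc_dict out) := by unfold Spec_count_dinucleotides; infer_instance

-- ===== CLAIM (what is proved, stated in full; the proofs are below) =====
def Claim_equal_count_dinucleotides : Prop := ∀ (this_seq : String) (dinuc_dict : List (String × Int)), Dom_count_dinucleotides this_seq dinuc_dict → Pre_count_dinucleotides this_seq dinuc_dict → Spec_count_dinucleotides this_seq dinuc_dict (count_dinucleotides this_seq dinuc_dict)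

-- ===== LEMMAS AND PROOFS =====

-- the target key every occurrence of dn is credited to (w.r.t. the ORIGINAL key set K)
def pvTarget (K : List String) (dn : String) : String := if dn ∈ K then dn else "NN"

-- one bulk increment
def pvBump (acc : PySem.Dict String Int) (p : String × Int) : PySem.Dict String Int :=
  acc.modify p.1 0 (· + p.2)

-- Keys are preserved by a bump at a present key
lemma pvKeys_bump (acc : PySem.Dict String Int) (p : String × Int) (h : p.1 ∈ acc.keys) :
    (pvBump acc p).keys = acc.keys := by
  rw [pvBump, PySem.Dict.keys_modify, PySem.Dict.keys_insert_of_contains]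
  exact (PySem.Dict.contains_iff_mem_keys _ _).mpr h

lemma pvKeys_foldl_bump (P : List (String × Int)) (acc : PySem.Dict String Int)
    (h : ∀ p ∈ P, p.1 ∈ acc.keys) :
    (P.foldl pvBump acc).keys = acc.keys := by
  induction P generalizing acc with
  | nil => rfl
  | cons p P ih =>
      have hk := pvKeys_bump acc p (h p (List.mem_cons_self ..))
      simp only [List.foldl_cons]
      rw [ih (pvBump acc p) (fun q hq => hk ▸ h q (List.mem_cons_of_mem _ hq)), hk]

lemma pvGetD_foldl_bump (P : List (String × Int)) (acc : PySem.Dict String Int) (k : String) :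
    (P.foldl pvBump acc).getD k 0 =
      acc.getD k 0 + ((P.filter (fun p => p.1 == k)).map Prod.snd).sum := by
  induction P generalizing acc with
  | nil => simp
  | cons p P ih =>
      simp only [List.foldl_cons, List.filter_cons]
      rw [ih]
      by_cases hk : p.1 = k
      · simp [hk, pvBump]
        ring
      · have : (p.1 == k) = false := by simp [hk]
        simp [this, pvBump, PySem.Dict.getD_modify, Ne.symm hk]

-- A's loop rewritten to pvBump at the pvTarget key, provided every key hits K or "NN" ∈ K.
lemma pvFold_norm (K : List String) (P : List (String × Int)) :
    ∀ (acc : PySem.Dict String Int), acc.keys = K →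
    (∀ p ∈ P, p.1 ∈ K ∨ "NN" ∈ K) →
    P.foldl (fun acc p =>
        if acc.contains p.1 then acc.modify p.1 0 (· + p.2)
        else acc.modify "NN" 0 (· + p.2)) acc
      = (P.map (fun p => (pvTarget K p.1, p.2))).foldl pvBump acc := by
  induction P with
  | nil => intro acc _ _; rfl
  | cons p P ih =>
      intro acc hkeys hP
      have hcont : acc.contains p.1 = true ↔ p.1 ∈ K := by
        rw [PySem.Dict.contains_iff_mem_keys, hkeys]
      have htgt : pvTarget K p.1 ∈ K := by
        rcases hP p (List.mem_cons_self ..) with h | h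
        · simp [pvTarget, h]
        · by_cases hm : p.1 ∈ K <;> simp [pvTarget, hm, h]
      have hstep : (if acc.contains p.1 then acc.modify p.1 0 (· + p.2)
          else acc.modify "NN" 0 (· + p.2)) = pvBump acc (pvTarget K p.1, p.2) := by
        by_cases hm : p.1 ∈ K
        · rw [if_pos (hcont.mpr hm)]; simp [pvBump, pvTarget, hm]
        · rw [if_neg (by simp [hcont, hm])]; simp [pvBump, pvTarget, hm]
      have hkeys' : (pvBump acc (pvTarget K p.1, p.2)).keys = K := by
        rw [pvKeys_bump _ _ (by simpa [hkeys] using htgt), hkeys]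
      simp only [List.foldl_cons, List.map_cons, hstep]
      exact ih _ hkeys' (fun q hq => hP q (List.mem_cons_of_mem _ hq))

-- merge-fold result: keys stay K and items are K with each value bulk-incremented
lemma pvItems_merge (K : List String) (hnd : K.Nodup) (d : PySem.Dict String Int)
    (hkeys : d.keys = K) (P : List (String × Int)) (hP : ∀ p ∈ P, p.1 ∈ K ∨ "NN" ∈ K) :
    (P.foldl (fun acc p =>
        if acc.contains p.1 then acc.modify p.1 0 (· + p.2)
        else acc.modify "NN" 0 (· + p.2)) d).items
      = K.map (fun k => (k, d.getD k 0 +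
          (((P.map (fun p => (pvTarget K p.1, p.2))).filter (fun p => p.1 == k)).map Prod.snd).sum)) := by
  rw [pvFold_norm K P d hkeys hP]
  have htK : ∀ p ∈ P.map (fun p => (pvTarget K p.1, p.2)), p.1 ∈ d.keys := by
    intro q hq
    rw [hkeys]
    rcases List.mem_map.mp hq with ⟨p, hp, rfl⟩
    rcases hP p hp with h | h
    · simp [pvTarget, h]
    · by_cases hm : p.1 ∈ K <;> simp [pvTarget, hm, h]
  have hkeys' := pvKeys_foldl_bump _ d htK
  rw [PySem.Dict.items_eq_map_keys _ (by rw [hkeys', hkeys]; exact hnd) 0, hkeys', hkeys]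
  exact List.map_congr_left (fun k _ => by rw [pvGetD_foldl_bump])

-- filtering a nodup list for one of its members gives just that member
lemma pvFilter_beq_self (K : List String) (hnd : K.Nodup) (k : String) (hk : k ∈ K) :
    K.filter (fun j => j == k) = [k] := by
  induction K with
  | nil => cases hk
  | cons a K ih =>
      rw [List.filter_cons]
      by_cases ha : a = k
      · subst ha
        have hnil : List.filter (fun j => j == a) K = [] := by
          rw [List.filter_eq_nil_iff]
          intro j hj hje
          exact (List.nodup_cons.mp hnd).1 (beq_iff_eq.mp hje ▸ hj)
        simp [hnil]
      · have hfa : (a == k) = false := by simp [ha]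
        simp only [hfa, Bool.false_eq_true, if_false]
        exact ih (List.nodup_cons.mp hnd).2
          ((List.mem_cons.mp hk).resolve_left (fun h => ha h.symm))

-- B's per-key fold: items are K with each value incremented by g k
lemma pvItems_perkey (K : List String) (hnd : K.Nodup) (d : PySem.Dict String Int)
    (hkeys : d.keys = K) (g : String → Int) :
    (K.foldl (fun acc k => acc.modify k 0 (· + g k)) d).items
      = K.map (fun k => (k, d.getD k 0 + g k)) := by
  have hfold : K.foldl (fun acc k => acc.modify k 0 (· + g k)) d
      = (K.map (fun k => (k, g k))).foldl pvBump d := by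
    rw [List.foldl_map]; rfl
  rw [hfold]
  have htK : ∀ p ∈ K.map (fun k => (k, g k)), p.1 ∈ d.keys := by
    intro q hq
    rcases List.mem_map.mp hq with ⟨j, hj, rfl⟩
    rw [hkeys]; exact hj
  have hkeys' := pvKeys_foldl_bump _ d htK
  rw [PySem.Dict.items_eq_map_keys _ (by rw [hkeys', hkeys]; exact hnd) 0, hkeys', hkeys]
  refine List.map_congr_left (fun k hk => ?_)
  rw [pvGetD_foldl_bump]
  congr 1
  rw [List.filter_map, show ((fun p : String × Int => p.1 == k) ∘ fun j => (j, g j))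
        = fun j => j == k from rfl,
      pvFilter_beq_self K hnd k hk]
  simp

lemma pvSum_ones {α : Type} (l : List α) : (l.map (fun _ => (1:Int))).sum = l.length := by
  induction l with
  | nil => simp
  | cons a l ih => simp; omega

-- ===== VERDICT (by name: the statement is the Claim_ definition above) =====
set_option maxHeartbeats 2000000 in
theorem count_dinucleotides_spec : Claim_equal_count_dinucleotides := by
  intro s d _hdom hpre
  obtain ⟨hnd, hpre⟩ := hpre
  unfold Spec_count_dinucleotides count_dinucleotides count_dinucleotides_alt
  have hmkkeys : (PySem.Dict.mk d).keys = d.map Prod.fst := rfl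
  set f : Int → String := fun i => PySem.Str.slice s (some i) (some (i + 2)) with hf
  set L : List String := (PySem.List.pyRange 0 (PySem.Str.len s - 1) 1).map f with hL
  set K : List String := d.map Prod.fst with hK
  -- every generated dinucleotide is a key, or "NN" is a key
  have hLK : ∀ dn ∈ L, dn ∈ K ∨ "NN" ∈ K := by
    intro dn hdn
    rcases List.mem_map.mp hdn with ⟨i, hi, rfl⟩
    rw [PySem.List.mem_pyRange_one] at hi
    have hlen : PySem.Str.len s = (s.toList.length : Int) := by simp [PySem.Str.len_eq]
    rw [hlen] at hi
    have h0 : (0:Int) ≤ i := hi.1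
    have hi2 : i.toNat < s.toList.length - 1 := by omega
    have hchars : (f i).toList = (s.toList.drop i.toNat).take 2 := by
      rw [hf]
      rw [PySem.Str.toList_slice, PySem.Chars.slice_eq_listSlice]
      rw [show i = (i.toNat : Int) by omega,
          show ((i.toNat : Int) + 2) = ((i.toNat : Int) + (2:Nat)) by push_cast; ring]
      exact PySem.List.slice_natCast_add s.toList i.toNat 2
    have hslice : f i = String.ofList ((s.toList.drop i.toNat).take 2) := by
      rw [← hchars]; simp
    rw [hslice]
    exact hpre i.toNat hi2
  -- A is the merge fold over the per-position pairs (dn, 1)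
  have hA : List.foldl (fun (acc : PySem.Dict String Int) i =>
      if acc.contains (f i) then acc.modify (f i) 0 (· + 1)
      else acc.modify "NN" 0 (· + 1))
      (PySem.Dict.mk d) (PySem.List.pyRange 0 (PySem.Str.len s - 1) 1)
      = List.foldl (fun (acc : PySem.Dict String Int) p =>
          if acc.contains p.1 then acc.modify p.1 0 (· + p.2)
          else acc.modify "NN" 0 (· + p.2))
        (PySem.Dict.mk d) (L.map (fun dn => (dn, (1:Int)))) := by
    rw [hL, List.map_map]
    exact (List.foldl_map (f := (fun dn => (dn, (1:Int))) ∘ f)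
      (g := fun (acc : PySem.Dict String Int) p =>
        if acc.contains p.1 then acc.modify p.1 0 (· + p.2)
        else acc.modify "NN" 0 (· + p.2))).symm
  show (List.foldl (fun (acc : PySem.Dict String Int) i =>
      if acc.contains (f i) then acc.modify (f i) 0 (· + 1)
      else acc.modify "NN" 0 (· + 1))
      (PySem.Dict.mk d) (PySem.List.pyRange 0 (PySem.Str.len s - 1) 1)).items
    = (K.foldl (fun (acc : PySem.Dict String Int) k =>
        acc.modify k 0 (· +
          (if k == "NN" then
            ((L.filter (fun dn => dn == "NN" || !(K.contains dn))).length : Int)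
          else (L.count k : Int))))
      (PySem.Dict.mk d)).items
  rw [hA,
      pvItems_merge K hnd _ hmkkeys _
        (by intro p hp; rcases List.mem_map.mp hp with ⟨dn, hdn, rfl⟩; exact hLK dn hdn),
      pvItems_perkey K hnd _ hmkkeys
        (fun k => if k == "NN" then
            ((L.filter (fun dn => dn == "NN" || !(K.contains dn))).length : Int)
          else (L.count k : Int))]
  refine List.map_congr_left (fun k hk => ?_)
  congr 1
  congr 1
  -- the aggregated A-side sum at key k equals B's per-key extra
  simp only [List.map_map, List.filter_map]
  show ((L.filter (fun dn => pvTarget K dn == k)).map (fun _ => (1:Int))).sum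
    = if k == "NN" then
        ((L.filter (fun dn => dn == "NN" || !(K.contains dn))).length : Int)
      else (L.count k : Int)
  rw [pvSum_ones]
  by_cases hNN : k = "NN"
  · subst hNN
    rw [if_pos (by decide : (("NN":String) == "NN") = true)]
    congr 2
    refine List.filter_congr (fun dn _ => ?_)
    by_cases hm : dn ∈ K <;> simp [pvTarget, hm]
  · rw [if_neg (by simpa using hNN)]
    have : L.filter (fun dn => pvTarget K dn == k) = L.filter (fun dn => dn == k) := by
      refine List.filter_congr (fun dn _ => ?_)
      by_cases hm : dn ∈ K
      · simp [pvTarget, hm]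
      · have h1 : (pvTarget K dn == k) = false := by
          simp only [pvTarget, if_neg hm, beq_eq_false_iff_ne]
          exact fun h => hNN h.symm
        have h2 : (dn == k) = false := by
          simp only [beq_eq_false_iff_ne]
          rintro rfl; exact hm hk
        rw [h1, h2]
    rw [this, List.count_eq_countP, List.countP_eq_length_filter]
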